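-- pv_equiv track=rewrite | github.com/matze298/agentteam | ci/src/ci/affected_tests.py | get_affected_tests
-- ===== SOURCE A (Python) =====
-- def get_affected_tests(changed_files: set[str], dependency_map: dict[str, set[str]]) -> set[str]:
--     """Determine which tests are affected based on changed files and the dependency graph.
--
--     Args:
--         changed_files: A set of changed Python files.
--         dependency_map: A mapping of Python files to their imports.
--
--     Returns:
--         A set of affected test files.
--     """
--
--     def _is_affected(file_path: str, visited: set[str] | None = None) -> bool:
--         """Recursively checks if a file is affected by changes."""
--         if visited is None:
--             visited = set()
--         if file_path in changed_files:
--             return True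
--         if file_path in visited:
--             return False
--         visited.add(file_path)
--
--         return any(_is_affected(imp, visited) for imp in dependency_map.get(file_path, []))
--
--     return {f for f in dependency_map if f.startswith("tests/") and f.endswith(".py") and _is_affected(f)}
-- ===== SOURCE B (Python) =====
-- def get_affected_tests(changed_files: set[str], dependency_map: dict[str, set[str]]) -> set[str]:
--     """Determine affected tests by saturating one shared 'affected' set over the whole
--     dependency graph (fixpoint iteration), instead of a separate DFS per test file."""
--     affected = set(changed_files)
--     changed = True
--     while changed:
--         changed = False
--         for f, imps in dependency_map.items():
--             if f not in affected and any(i in affected for i in imps):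
--                 affected.add(f)
--                 changed = True
--     return {f for f in dependency_map
--             if f.startswith("tests/") and f.endswith(".py") and f in affected}
-- ===== Notes on version B (the rewrite author's own statement) =====
-- stated objective: alternative
-- what changed: A runs a fresh recursive DFS (with its own visited set) from every candidate test file; B computes the affected set once for the whole graph by fixpoint saturation (repeated passes over the dependency map until no file is added) and then filters the test files against it.
import Mathlib
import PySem

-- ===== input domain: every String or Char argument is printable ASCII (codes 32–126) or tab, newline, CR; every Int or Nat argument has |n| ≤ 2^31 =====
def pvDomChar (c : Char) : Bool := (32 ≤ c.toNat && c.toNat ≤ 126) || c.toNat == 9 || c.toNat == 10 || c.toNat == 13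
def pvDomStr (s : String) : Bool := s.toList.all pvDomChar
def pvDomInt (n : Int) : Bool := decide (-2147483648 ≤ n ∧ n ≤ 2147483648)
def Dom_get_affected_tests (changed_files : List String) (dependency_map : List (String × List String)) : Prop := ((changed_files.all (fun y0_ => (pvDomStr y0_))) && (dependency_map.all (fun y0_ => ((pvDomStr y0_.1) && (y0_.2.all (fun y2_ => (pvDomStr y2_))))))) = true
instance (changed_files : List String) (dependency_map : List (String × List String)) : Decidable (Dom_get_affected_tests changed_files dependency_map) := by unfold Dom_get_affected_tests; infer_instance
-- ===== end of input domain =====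

-- B replaces A's per-test recursive DFS by one shared fixpoint saturation of an 'affected'
-- set over the whole dependency map (objective: alternative algorithm, one shared traversal).


-- ===== PORT A =====
-- dependency_map.get(f, [])
def pvGetDeps (dependency_map : List (String × List String)) (f : String) : List String :=
  PySem.Dict.getD ⟨dependency_map⟩ f []

mutual
-- _is_affected(file_path, visited); the Bool result together with the mutated visited set.
-- Fuel only makes the recursion total: each recursing call adds a distinct dict key to
-- visited, so with fuel = dependency_map.length + 1 the fuel-0 branch is never reached.
def pvIsAffected (changed_files : List String) (dependency_map : List (String × List String)) :
    Nat → String → List String → Bool × List String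
  | 0, _, visited => (false, visited)
  | fuel+1, file_path, visited =>
    if changed_files.contains file_path then (true, visited)
    else if visited.contains file_path then (false, visited)
    else pvAnyAffected changed_files dependency_map fuel
      (pvGetDeps dependency_map file_path) (PySem.Set.add visited file_path)
  termination_by fuel _ _ => (fuel, 0)

-- any(_is_affected(imp, visited) for imp in …) — short-circuit, visited threaded through
def pvAnyAffected (changed_files : List String) (dependency_map : List (String × List String)) :
    Nat → List String → List String → Bool × List String
  | _, [], visited => (false, visited)
  | fuel, imp :: rest, visited =>
    let r := pvIsAffected changed_files dependency_map fuel imp visited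
    if r.1 then r else pvAnyAffected changed_files dependency_map fuel rest r.2
  termination_by fuel l _ => (fuel, l.length + 1)
end

def get_affected_tests (changed_files : List String) (dependency_map : List (String × List String)) : List String :=
  PySem.Set.ofList ((dependency_map.map Prod.fst).filter (fun f =>
    PySem.Str.startswith f "tests/" && PySem.Str.endswith f ".py" &&
    (pvIsAffected changed_files dependency_map (dependency_map.length + 1) f []).1))

-- ===== PORT B =====
-- one item of the inner 'for f, imps in dependency_map.items()' loop
def pvStep (st : List String × Bool) (p : String × List String) : List String × Bool :=
  if !st.1.contains p.1 && p.2.any (fun i => st.1.contains i) then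
    (PySem.Set.add st.1 p.1, true)
  else st

-- one full pass of the while-loop body; .2 = the 'changed' flag
def pvPass (dependency_map : List (String × List String)) (affected : List String) :
    List String × Bool :=
  dependency_map.foldl pvStep (affected, false)

-- the while-loop; fuel = dependency_map.length + 1 passes always suffice, since every
-- pass with changed=True adds at least one dict key to 'affected'
def pvSaturate (dependency_map : List (String × List String)) :
    Nat → List String → List String
  | 0, affected => affected
  | fuel+1, affected =>
    let r := pvPass dependency_map affected
    if r.2 then pvSaturate dependency_map fuel r.1 else r.1

def get_affected_tests_alt (changed_files : List String) (dependency_map : List (String × List String)) : List String :=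
  let affected := pvSaturate dependency_map (dependency_map.length + 1)
    (PySem.Set.ofList changed_files)
  PySem.Set.ofList ((dependency_map.map Prod.fst).filter (fun f =>
    PySem.Str.startswith f "tests/" && PySem.Str.endswith f ".py" && affected.contains f))

-- ===== PRECONDITION & SPEC =====
-- Pre_ excludes association lists with duplicate keys, which cannot arise from a Python
-- dict (the dependency_map parameter is a dict); every genuine input satisfies Pre_.
def Pre_get_affected_tests (changed_files : List String) (dependency_map : List (String × List String)) : Prop :=
  (dependency_map.map Prod.fst).Nodup
instance (changed_files : List String) (dependency_map : List (String × List String)) : Decidable (Pre_get_affected_tests changed_files dependency_map) := by unfold Pre_get_affected_tests; infer_instance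

def pvWitness_get_affected_tests : List String × (List (String × List String)) :=
  (["a.py"], [("tests/t.py", ["a.py"]), ("b.py", [])])

def Spec_get_affected_tests (changed_files : List String) (dependency_map : List (String × List String)) (out : List String) : Prop := out = get_affected_tests_alt changed_files dependency_map
instance (changed_files : List String) (dependency_map : List (String × List String)) (out : List String) : Decidable (Spec_get_affected_tests changed_files dependency_map out) := by unfold Spec_get_affected_tests; infer_instance

-- ===== CLAIM (what is proved, stated in full; the proofs are below) =====
def Claim_equal_get_affected_tests : Prop := ∀ (changed_files : List String) (dependency_map : List (String × List String)), Dom_get_affected_tests changed_files dependency_map → Pre_get_affected_tests changed_files dependency_map → Spec_get_affected_tests changed_files dependency_map (get_affected_tests changed_files dependency_map)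

-- ===== LEMMAS AND PROOFS =====

-- reachability along dependency edges from a changed file: the semantics both programs compute
inductive pvReach (changed : List String) (dm : List (String × List String)) : String → Prop
  | base (x : String) : x ∈ changed → pvReach changed dm x
  | step (x i : String) : i ∈ pvGetDeps dm x → pvReach changed dm i → pvReach changed dm x

-- number of key occurrences not yet in v: the fuel measure both loops decrease
def pvKC (dm : List (String × List String)) (v : List String) : Nat :=
  ((dm.map Prod.fst).filter (fun k => !v.contains k)).length

theorem pvContains_true {l : List String} {x : String} (h : x ∈ l) :
    l.contains x = true := List.contains_iff_mem.2 h

theorem pvContains_false {l : List String} {x : String} (h : x ∉ l) :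
    l.contains x = false := by
  cases hh : l.contains x
  · rfl
  · exact absurd (List.contains_iff_mem.1 hh) h

theorem pvMem_of_contains {l : List String} {x : String} (h : l.contains x = true) :
    x ∈ l := List.contains_iff_mem.1 h

theorem pvGetDeps_of_not_mem (dm : List (String × List String)) (f : String)
    (h : f ∉ dm.map Prod.fst) : pvGetDeps dm f = [] := by
  have hfind : dm.find? (fun p => p.1 == f) = none := by
    rw [List.find?_eq_none]
    intro p hp
    simp only [beq_iff_eq]
    intro he
    exact h (he ▸ List.mem_map_of_mem hp)
  simp [pvGetDeps, PySem.Dict.getD, PySem.Dict.get?, hfind]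

theorem pvGetDeps_of_mem (dm : List (String × List String))
    (hnd : (dm.map Prod.fst).Nodup) (p : String × List String) (h : p ∈ dm) :
    pvGetDeps dm p.1 = p.2 := by
  induction dm with
  | nil => cases h
  | cons a t ih =>
    simp only [List.map_cons, List.nodup_cons] at hnd
    rcases List.mem_cons.1 h with rfl | hmem
    · simp [pvGetDeps, PySem.Dict.getD, PySem.Dict.get?, List.find?_cons_of_pos]
    · have hne : ¬((fun q : String × List String => q.1 == p.1) a) = true := by
        simp only [beq_iff_eq]
        intro he
        exact hnd.1 (he ▸ List.mem_map_of_mem hmem)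
      have htail := ih hnd.2 hmem
      simp only [pvGetDeps, PySem.Dict.getD, PySem.Dict.get?] at htail ⊢
      rw [show List.find? (fun q : String × List String => q.1 == p.1) (a :: t)
          = List.find? (fun q : String × List String => q.1 == p.1) t from
        List.find?_cons_of_neg hne]
      exact htail

theorem pvKC_le (dm : List (String × List String)) (v : List String) :
    pvKC dm v ≤ dm.length := by
  calc ((dm.map Prod.fst).filter (fun k => !v.contains k)).length
      ≤ (dm.map Prod.fst).length := List.length_filter_le _ _
    _ = dm.length := List.length_map ..

theorem pvKC_anti (dm : List (String × List String)) (v w : List String)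
    (h : ∀ x ∈ v, x ∈ w) : pvKC dm w ≤ pvKC dm v := by
  unfold pvKC
  rw [← List.countP_eq_length_filter, ← List.countP_eq_length_filter]
  apply List.countP_mono_left
  intro x _ hx
  rw [Bool.not_eq_true'] at hx ⊢
  by_cases hm : x ∈ v
  · rw [pvContains_true (h x hm)] at hx
    cases hx
  · exact pvContains_false hm

theorem pvCountP_lt (l : List String) (p q : String → Bool) (k : String)
    (hpq : ∀ x ∈ l, p x = true → q x = true) (hk : k ∈ l)
    (hpk : p k = false) (hqk : q k = true) : l.countP p < l.countP q := by
  induction l with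
  | nil => cases hk
  | cons a t ihl =>
    rw [List.countP_cons, List.countP_cons]
    rcases List.mem_cons.1 hk with rfl | hkt
    · have h1 : t.countP p ≤ t.countP q :=
        List.countP_mono_left (fun x hx => hpq x (List.mem_cons_of_mem _ hx))
      rw [hpk, hqk]
      simp only [Bool.false_eq_true, if_false, if_true]
      omega
    · have h2 := ihl (fun x hx hpx => hpq x (List.mem_cons_of_mem _ hx) hpx) hkt
      have h3 : (if p a = true then 1 else 0) ≤ (if q a = true then 1 else 0) := by
        by_cases hpa : p a = true
        · rw [if_pos hpa, if_pos (hpq a (List.mem_cons_self ..) hpa)]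
        · rw [if_neg hpa]; omega
      omega

theorem pvKC_lt (dm : List (String × List String)) (v w : List String) (k : String)
    (hsub : ∀ x ∈ v, x ∈ w) (hk : k ∈ dm.map Prod.fst) (hkv : k ∉ v) (hkw : k ∈ w) :
    pvKC dm w < pvKC dm v := by
  unfold pvKC
  rw [← List.countP_eq_length_filter, ← List.countP_eq_length_filter]
  apply pvCountP_lt _ _ _ k _ hk
  · rw [Bool.not_eq_false']
    exact pvContains_true hkw
  · rw [Bool.not_eq_true']
    exact pvContains_false hkv
  · intro x _ hx
    rw [Bool.not_eq_true'] at hx ⊢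
    by_cases hm : x ∈ v
    · rw [pvContains_true (hsub x hm)] at hx
      cases hx
    · exact pvContains_false hm

-- ----- A side -----


theorem pvIs_true (c : List String) (dm : List (String × List String)) :
    ∀ fuel fp v, (pvIsAffected c dm fuel fp v).1 = true → pvReach c dm fp := by
  intro fuel
  induction fuel with
  | zero => intro fp v h; simp [pvIsAffected] at h
  | succ n ih =>
    have hany : ∀ l v, (pvAnyAffected c dm n l v).1 = true → ∃ i ∈ l, pvReach c dm i := by
      intro l
      induction l with
      | nil => intro v h; simp [pvAnyAffected] at h
      | cons i rest ihl =>
        intro v h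
        simp only [pvAnyAffected] at h
        by_cases h1 : (pvIsAffected c dm n i v).1 = true
        · exact ⟨i, List.mem_cons_self .., ih i v h1⟩
        · rw [if_neg h1] at h
          obtain ⟨j, hj, hr⟩ := ihl _ h
          exact ⟨j, List.mem_cons_of_mem _ hj, hr⟩
    intro fp v h
    simp only [pvIsAffected] at h
    by_cases h1 : c.contains fp = true
    · exact pvReach.base fp (pvMem_of_contains h1)
    · rw [if_neg h1] at h
      by_cases h2 : v.contains fp = true
      · rw [if_pos h2] at h
        cases h
      · rw [if_neg h2] at h
        obtain ⟨i, hi, hr⟩ := hany _ _ h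
        exact pvReach.step fp i hi hr

theorem pvIs_false (c : List String) (dm : List (String × List String)) :
    ∀ fuel fp v v', pvKC dm v < fuel → pvIsAffected c dm fuel fp v = (false, v') →
      c.contains fp = false ∧ fp ∈ v' ∧ (∀ x ∈ v, x ∈ v') ∧
      ∀ z ∈ v', z ∉ v → (c.contains z = false ∧ ∀ i ∈ pvGetDeps dm z, i ∈ v') := by
  intro fuel
  induction fuel with
  | zero => intro fp v v' hkc; exact absurd hkc (Nat.not_lt_zero _)
  | succ n ih =>
    have hanyF : ∀ l v v', pvKC dm v < n → pvAnyAffected c dm n l v = (false, v') →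
        (∀ x ∈ v, x ∈ v') ∧ (∀ i ∈ l, c.contains i = false ∧ i ∈ v') ∧
        ∀ z ∈ v', z ∉ v → (c.contains z = false ∧ ∀ i ∈ pvGetDeps dm z, i ∈ v') := by
      intro l
      induction l with
      | nil =>
        intro v v' hkc heq
        simp only [pvAnyAffected] at heq
        injection heq with hb hv
        subst hv
        exact ⟨fun x hx => hx, fun i hi => absurd hi List.not_mem_nil,
          fun z hz hzv => absurd hz hzv⟩
      | cons i rest ihl =>
        intro v v' hkc heq
        simp only [pvAnyAffected] at heq
        rcases hri : pvIsAffected c dm n i v with ⟨b, v2⟩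
        rw [hri] at heq
        cases b with
        | true => simp at heq
        | false =>
          simp only [if_false, Bool.false_eq_true] at heq
          obtain ⟨hic, hiv2, hsub1, hcl1⟩ := ih i v v2 hkc hri
          have hkc2 : pvKC dm v2 < n := lt_of_le_of_lt (pvKC_anti dm v v2 hsub1) hkc
          obtain ⟨hsub2, hrest, hcl2⟩ := ihl v2 v' hkc2 heq
          refine ⟨fun x hx => hsub2 x (hsub1 x hx), ?_, ?_⟩
          · intro j hj
            rcases List.mem_cons.1 hj with rfl | hjr
            · exact ⟨hic, hsub2 j hiv2⟩
            · exact hrest j hjr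
          · intro z hz hzv
            by_cases hzv2 : z ∈ v2
            · obtain ⟨hc1, hd1⟩ := hcl1 z hzv2 hzv
              exact ⟨hc1, fun i2 hi2 => hsub2 _ (hd1 i2 hi2)⟩
            · exact hcl2 z hz hzv2
    intro fp v v' hkc heq
    simp only [pvIsAffected] at heq
    by_cases h1 : c.contains fp = true
    · rw [if_pos h1] at heq
      cases heq
    · rw [if_neg h1] at heq
      have h1f : c.contains fp = false := by
        revert h1; cases c.contains fp <;> simp
      by_cases h2 : v.contains fp = true
      · rw [if_pos h2] at heq
        injection heq with hb hv
        subst hv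
        exact ⟨h1f, pvMem_of_contains h2, fun x hx => hx, fun z hz hzv => absurd hz hzv⟩
      · rw [if_neg h2] at heq
        have hfpv : fp ∉ v := fun hm => h2 (pvContains_true hm)
        have hveq : PySem.Set.add v fp = v ++ [fp] := by
          simp [PySem.Set.add, hfpv]
        rw [hveq] at heq
        by_cases hd : pvGetDeps dm fp = []
        · rw [hd] at heq
          simp only [pvAnyAffected] at heq
          injection heq with hb hv
          subst hv
          refine ⟨h1f, List.mem_append_right _ (List.mem_singleton.2 rfl),
            fun x hx => List.mem_append_left _ hx, ?_⟩
          intro z hz hzv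
          have hzfp : z = fp := by
            rcases List.mem_append.1 hz with h | h
            · exact absurd h hzv
            · exact List.mem_singleton.1 h
          subst hzfp
          exact ⟨h1f, by rw [hd]; intro i hi; cases hi⟩
        · have hfpkey : fp ∈ dm.map Prod.fst := by
            by_contra hn
            exact hd (pvGetDeps_of_not_mem dm fp hn)
          have hlt : pvKC dm (v ++ [fp]) < pvKC dm v :=
            pvKC_lt dm v (v ++ [fp]) fp (fun x hx => List.mem_append_left _ hx)
              hfpkey hfpv (List.mem_append_right _ (List.mem_singleton.2 rfl))
          have hkc2 : pvKC dm (v ++ [fp]) < n := by omega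
          obtain ⟨hsub, hall, hcl⟩ := hanyF _ _ _ hkc2 heq
          refine ⟨h1f, hsub fp (List.mem_append_right _ (List.mem_singleton.2 rfl)),
            fun x hx => hsub x (List.mem_append_left _ hx), ?_⟩
          intro z hz hzv
          by_cases hzfp : z = fp
          · subst hzfp
            exact ⟨h1f, fun i hi => (hall i hi).2⟩
          · have hznew : z ∉ v ++ [fp] := by
              intro hm
              rcases List.mem_append.1 hm with h | h
              · exact hzv h
              · exact hzfp (List.mem_singleton.1 h)
            exact hcl z hz hznew

theorem pvReach_not_mem_closed (c : List String) (dm : List (String × List String))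
    (S : List String)
    (hS : ∀ z ∈ S, c.contains z = false ∧ ∀ i ∈ pvGetDeps dm z, i ∈ S) :
    ∀ x, pvReach c dm x → x ∉ S := by
  intro x hx
  induction hx with
  | base y hy =>
    intro hyS
    have := (hS y hyS).1
    rw [List.contains_iff_mem.2 hy] at this
    cases this
  | step y i hi _ ihr =>
    intro hyS
    exact ihr ((hS y hyS).2 i hi)

theorem pvIsA_iff (c : List String) (dm : List (String × List String)) (f : String) :
    (pvIsAffected c dm (dm.length + 1) f []).1 = true ↔ pvReach c dm f := by
  constructor
  · exact pvIs_true c dm _ f []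
  · intro hr
    by_contra hfalse
    rcases hres : pvIsAffected c dm (dm.length + 1) f [] with ⟨b, v'⟩
    rw [hres] at hfalse
    have hb : b = false := by revert hfalse; cases b <;> simp
    subst hb
    have hkc : pvKC dm [] < dm.length + 1 := Nat.lt_succ_of_le (pvKC_le dm [])
    obtain ⟨-, hfv, -, hcl⟩ := pvIs_false c dm (dm.length + 1) f [] v' hkc hres
    have hclosed : ∀ z ∈ v', c.contains z = false ∧ ∀ i ∈ pvGetDeps dm z, i ∈ v' :=
      fun z hz => hcl z hz List.not_mem_nil
    exact pvReach_not_mem_closed c dm v' hclosed f hr hfv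

-- ----- B side -----

theorem pvStep_mono (l : List (String × List String)) :
    ∀ st : List String × Bool, ∀ x ∈ st.1, x ∈ (l.foldl pvStep st).1 := by
  induction l with
  | nil => intro st x hx; exact hx
  | cons p t ih =>
    intro st x hx
    rw [List.foldl_cons]
    apply ih
    unfold pvStep
    split
    · exact (PySem.Set.mem_add _ _ _).2 (Or.inl hx)
    · exact hx

theorem pvStep_flag (l : List (String × List String)) :
    ∀ st : List String × Bool, st.2 = true → (l.foldl pvStep st).2 = true := by
  induction l with
  | nil => intro st h; exact h
  | cons p t ih =>
    intro st h
    rw [List.foldl_cons]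
    apply ih
    unfold pvStep
    split
    · rfl
    · exact h

theorem pvPass_sound (c : List String) (dm : List (String × List String))
    (hnd : (dm.map Prod.fst).Nodup) :
    ∀ l : List (String × List String), (∀ p ∈ l, p ∈ dm) →
    ∀ st : List String × Bool, (∀ z ∈ st.1, pvReach c dm z) →
    ∀ z ∈ (l.foldl pvStep st).1, pvReach c dm z := by
  intro l
  induction l with
  | nil => intro _ st hst z hz; exact hst z hz
  | cons p t ih =>
    intro hpl st hst
    rw [List.foldl_cons]
    apply ih (fun q hq => hpl q (List.mem_cons_of_mem _ hq))
    intro w hw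
    unfold pvStep at hw
    split at hw
    · rename_i hcond
      simp only [Bool.and_eq_true] at hcond
      obtain ⟨-, hany⟩ := hcond
      rcases (PySem.Set.mem_add _ _ _).1 hw with hw' | rfl
      · exact hst w hw'
      · simp only [List.any_eq_true] at hany
        obtain ⟨i, hi, hic⟩ := hany
        have hdeps : pvGetDeps dm p.1 = p.2 :=
          pvGetDeps_of_mem dm hnd p (hpl p (List.mem_cons_self ..))
        exact pvReach.step p.1 i (hdeps ▸ hi) (hst i (pvMem_of_contains hic))
    · exact hst w hw

theorem pvPass_fix (l : List (String × List String)) :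
    ∀ st : List String × Bool, (l.foldl pvStep st).2 = false →
      (l.foldl pvStep st).1 = st.1 ∧
      ∀ p ∈ l, st.1.contains p.1 = true ∨ p.2.any (fun i => st.1.contains i) = false := by
  induction l with
  | nil => intro st _; exact ⟨rfl, fun p hp => absurd hp List.not_mem_nil⟩
  | cons p t ih =>
    intro st hfl
    rw [List.foldl_cons] at hfl ⊢
    have hcond : ¬((!st.1.contains p.1 && p.2.any (fun i => st.1.contains i)) = true) := by
      intro hc
      have hstep : (pvStep st p).2 = true := by
        unfold pvStep
        rw [if_pos hc]
      rw [pvStep_flag t _ hstep] at hfl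
      cases hfl
    have hstep : pvStep st p = st := by
      unfold pvStep
      rw [if_neg hcond]
    rw [hstep] at hfl ⊢
    obtain ⟨h1, h2⟩ := ih st hfl
    refine ⟨h1, ?_⟩
    intro q hq
    rcases List.mem_cons.1 hq with rfl | hqt
    · by_cases hc1 : st.1.contains q.1 = true
      · exact Or.inl hc1
      · right
        cases hc2 : q.2.any (fun i => st.1.contains i)
        · rfl
        · exfalso
          apply hcond
          rw [Bool.and_eq_true, Bool.not_eq_true']
          exact ⟨by revert hc1; cases st.1.contains q.1 <;> simp, hc2⟩
    · exact h2 q hqt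

theorem pvPass_progress (l : List (String × List String)) :
    ∀ st : List String × Bool, (l.foldl pvStep st).2 = true →
      st.2 = true ∨ ∃ k, k ∈ l.map Prod.fst ∧ st.1.contains k = false ∧
        k ∈ (l.foldl pvStep st).1 := by
  induction l with
  | nil => intro st h; exact Or.inl h
  | cons p t ih =>
    intro st h
    rw [List.foldl_cons] at h ⊢
    by_cases hcond : (!st.1.contains p.1 && p.2.any (fun i => st.1.contains i)) = true
    · right
      have hstep : pvStep st p = (PySem.Set.add st.1 p.1, true) := by
        unfold pvStep
        rw [if_pos hcond]
      rw [Bool.and_eq_true] at hcond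
      obtain ⟨hnc, -⟩ := hcond
      refine ⟨p.1, List.mem_map_of_mem (List.mem_cons_self ..), ?_, ?_⟩
      · rw [Bool.not_eq_true'] at hnc
        exact hnc
      · rw [hstep]
        exact pvStep_mono t _ p.1 ((PySem.Set.mem_add _ _ _).2 (Or.inr rfl))
    · have hstep : pvStep st p = st := by
        unfold pvStep
        rw [if_neg hcond]
      rw [hstep] at h ⊢
      rcases ih st h with h1 | ⟨k, hk, hkc, hkm⟩
      · exact Or.inl h1
      · exact Or.inr ⟨k, List.mem_cons_of_mem _ (by simpa using hk), hkc, hkm⟩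

theorem pvSat_spec (c : List String) (dm : List (String × List String))
    (hnd : (dm.map Prod.fst).Nodup) :
    ∀ fuel aff, pvKC dm aff < fuel → (∀ z ∈ aff, pvReach c dm z) → (∀ x ∈ c, x ∈ aff) →
      (∀ z ∈ pvSaturate dm fuel aff, pvReach c dm z) ∧
      (∀ x ∈ c, x ∈ pvSaturate dm fuel aff) ∧
      (∀ p ∈ dm, (pvSaturate dm fuel aff).contains p.1 = true ∨
        p.2.any (fun i => (pvSaturate dm fuel aff).contains i) = false) := by
  intro fuel
  induction fuel with
  | zero => intro aff hkc; exact absurd hkc (Nat.not_lt_zero _)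
  | succ n ih =>
    intro aff hkc hinv hc
    rcases hflag : (pvPass dm aff).2 with _ | _
    · -- pass made no change: fixpoint reached
      have hres : pvSaturate dm (n + 1) aff = (pvPass dm aff).1 := by
        simp only [pvSaturate, hflag, if_false, Bool.false_eq_true]
      obtain ⟨h1, h2⟩ := pvPass_fix dm (aff, false) hflag
      have h1' : (pvPass dm aff).1 = aff := h1
      rw [hres, h1']
      exact ⟨hinv, hc, h2⟩
    · -- pass changed something: recurse with strictly smaller pvKC
      have hres : pvSaturate dm (n + 1) aff = pvSaturate dm n (pvPass dm aff).1 := by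
        simp only [pvSaturate, hflag, if_true]
      rcases pvPass_progress dm (aff, false) hflag with hst | ⟨k, hk, hkc0, hkmem⟩
      · cases hst
      · have hsub : ∀ x ∈ aff, x ∈ (pvPass dm aff).1 := pvStep_mono dm (aff, false)
        have hkv : k ∉ aff := by
          intro hm
          rw [pvContains_true hm] at hkc0
          cases hkc0
        have hlt : pvKC dm (pvPass dm aff).1 < pvKC dm aff :=
          pvKC_lt dm aff (pvPass dm aff).1 k hsub hk hkv hkmem
        have hkc' : pvKC dm (pvPass dm aff).1 < n := by omega
        rw [hres]
        exact ih (pvPass dm aff).1 hkc'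
          (pvPass_sound c dm hnd dm (fun _ h => h) (aff, false) hinv)
          (fun x hx => hsub x (hc x hx))

theorem pvSatA_iff (c : List String) (dm : List (String × List String))
    (hnd : (dm.map Prod.fst).Nodup) (f : String) :
    (pvSaturate dm (dm.length + 1) (PySem.Set.ofList c)).contains f = true ↔ pvReach c dm f := by
  have hkc : pvKC dm (PySem.Set.ofList c) < dm.length + 1 :=
    Nat.lt_succ_of_le (pvKC_le dm _)
  obtain ⟨hinv, hc, hfix⟩ := pvSat_spec c dm hnd (dm.length + 1) (PySem.Set.ofList c) hkc
    (fun z hz => pvReach.base z ((PySem.Set.mem_ofList _ _).1 hz))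
    (fun x hx => (PySem.Set.mem_ofList _ _).2 hx)
  constructor
  · intro h
    exact hinv f (pvMem_of_contains h)
  · intro hr
    induction hr with
    | base y hy => exact pvContains_true (hc y hy)
    | step y i hi _ ihr =>
      have hkey : y ∈ dm.map Prod.fst := by
        by_contra hn
        rw [pvGetDeps_of_not_mem dm y hn] at hi
        cases hi
      obtain ⟨p, hp, hpf⟩ := List.mem_map.1 hkey
      rcases hfix p hp with hcy | hany
      · rw [hpf] at hcy
        exact hcy
      · have hdeps : pvGetDeps dm y = p.2 := by
          rw [← hpf]
          exact pvGetDeps_of_mem dm hnd p hp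
        rw [hdeps] at hi
        rw [List.any_eq_false] at hany
        exact absurd ihr (hany i hi)

-- ===== VERDICT (by name: the statement is the Claim_ definition above) =====
theorem get_affected_tests_spec : Claim_equal_get_affected_tests := by
  intro c dm _ hnd
  unfold Spec_get_affected_tests get_affected_tests get_affected_tests_alt
  refine congrArg PySem.Set.ofList (List.filter_congr ?_)
  intro f hf
  have h1 := pvIsA_iff c dm f
  have h2 := pvSatA_iff c dm hnd f
  have : (pvIsAffected c dm (dm.length + 1) f []).1
      = (pvSaturate dm (dm.length + 1) (PySem.Set.ofList c)).contains f := by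
    rw [Bool.eq_iff_iff]; rw [h1, h2]
  rw [this]
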